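-- pv_equiv track=rewrite | github.com/tsamouridis/ACM-AUTh-Days-of-Coding-Solutions | DAY 3/findFakeUsers.py | emailIsFake
-- ===== SOURCE A (Python) =====
-- def emailIsFake(email):
--     verifiedEmails = ['gmail.com', 'outlook.com', 'hotmail.com', 'yahoo.com', 'icloud.com']
--     if email == '':
--         return False
--     else:
--         for index, element in enumerate(email):
--             if element == '@':
--                 if email[(index+1):len(email)] in verifiedEmails:
--                     return False
--         return True
-- ===== SOURCE B (Python) =====
-- def emailIsFake(email):
--     verifiedEmails = ['gmail.com', 'outlook.com', 'hotmail.com', 'yahoo.com', 'icloud.com']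
--     if email == '':
--         return False
--     return not any(email.endswith('@' + d) for d in verifiedEmails)
-- ===== Notes on version B (the rewrite author's own statement) =====
-- stated objective: simpler
-- what changed: Replaces the per-character scan (which slices the tail and tests list membership at every at-sign) by a single pass over the five verified domains, asking whether the email ends with an at-sign followed by that domain; correct because the tail after some at-sign equals a verified domain exactly when the email ends with that delimited domain.
import Mathlib
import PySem

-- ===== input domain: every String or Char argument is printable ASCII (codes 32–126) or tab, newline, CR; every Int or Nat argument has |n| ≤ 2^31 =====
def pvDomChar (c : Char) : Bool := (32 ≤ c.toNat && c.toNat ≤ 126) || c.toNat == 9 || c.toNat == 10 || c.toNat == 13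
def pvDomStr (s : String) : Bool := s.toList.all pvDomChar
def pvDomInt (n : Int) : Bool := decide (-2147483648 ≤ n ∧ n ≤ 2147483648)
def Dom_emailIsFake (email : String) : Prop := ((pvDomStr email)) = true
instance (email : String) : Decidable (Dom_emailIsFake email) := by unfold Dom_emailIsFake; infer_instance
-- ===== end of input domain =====

-- B replaces A's per-character '@' scan (slice + membership at each '@') by testing whether the
-- email ends with '@'+domain for one of the five verified domains: simpler, no index arithmetic.


-- ===== PORT A =====
def pvVerifiedEmails : List String :=
  ["gmail.com", "outlook.com", "hotmail.com", "yahoo.com", "icloud.com"]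

-- the 'for index, element in enumerate(email)' loop with its early 'return False'
def pvLoopA (email : String) : List (Int × Char) → Bool
  | [] => true
  | (index, element) :: rest =>
    if element = '@' then
      if PySem.Str.slice email (some (index + 1)) (some (PySem.Str.len email)) ∈ pvVerifiedEmails
      then false
      else pvLoopA email rest
    else pvLoopA email rest

def emailIsFake (email : String) : Bool :=
  if email = "" then false
  else pvLoopA email (PySem.List.enumerate email.toList 0)

-- ===== PORT B =====
def emailIsFake_alt (email : String) : Bool :=
  if email = "" then false
  else !(pvVerifiedEmails.any fun d => PySem.Str.endswith email ("@" ++ d))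

-- ===== PRECONDITION & SPEC =====
def Spec_emailIsFake (email : String) (out : Bool) : Prop := out = emailIsFake_alt email
instance (email : String) (out : Bool) : Decidable (Spec_emailIsFake email out) := by unfold Spec_emailIsFake; infer_instance

-- ===== CLAIM (what is proved, stated in full; the proofs are below) =====
def Claim_equal_emailIsFake : Prop := ∀ (email : String), Dom_emailIsFake email → Spec_emailIsFake email (emailIsFake email)

-- ===== LEMMAS AND PROOFS =====

-- the loop returns false exactly when some listed pair hits a verified suffix
theorem pvLoopA_eq_false_iff (email : String) (l : List (Int × Char)) :
    pvLoopA email l = false ↔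
      ∃ p ∈ l, p.2 = '@' ∧
        PySem.Str.slice email (some (p.1 + 1)) (some (PySem.Str.len email)) ∈ pvVerifiedEmails := by
  induction l with
  | nil => simp [pvLoopA]
  | cons hd tl ih =>
    obtain ⟨i, c⟩ := hd
    simp only [pvLoopA]
    split_ifs with hc hm
    · exact iff_of_true rfl ⟨(i, c), List.mem_cons_self, hc, hm⟩
    · simp only [List.mem_cons]
      constructor
      · intro h
        obtain ⟨p, hp, h1, h2⟩ := ih.mp h
        exact ⟨p, Or.inr hp, h1, h2⟩
      · rintro ⟨p, (rfl | hp), h1, h2⟩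
        · exact absurd h2 hm
        · exact ih.mpr ⟨p, hp, h1, h2⟩
    · simp only [List.mem_cons]
      constructor
      · intro h
        obtain ⟨p, hp, h1, h2⟩ := ih.mp h
        exact ⟨p, Or.inr hp, h1, h2⟩
      · rintro ⟨p, (rfl | hp), h1, h2⟩
        · exact absurd h1 hc
        · exact ih.mpr ⟨p, hp, h1, h2⟩

-- the Python slice email[(k+1):len(email)] is the list drop
theorem pvSlice_drop (email : String) (k : Nat) :
    (PySem.Str.slice email (some ((k : Int) + 1)) (some (PySem.Str.len email))).toList
      = email.toList.drop (k + 1) := by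
  have h1 : ((k : Int) + 1) = ((k + 1 : Nat) : Int) := by push_cast; ring
  rw [PySem.Str.toList_slice, PySem.Chars.slice_eq_listSlice, PySem.Str.len_eq, h1,
    PySem.List.slice_natCast]
  exact List.take_of_length_le (by simp)

-- membership of strings decided via toList
theorem pvMem_toList (s : String) (l : List String) :
    s ∈ l ↔ s.toList ∈ l.map String.toList := by
  simp only [List.mem_map]
  constructor
  · intro h; exact ⟨s, h, rfl⟩
  · rintro ⟨t, ht, he⟩
    have : t = s := by
      apply String.ext
      · exact he
    exact this ▸ ht

-- core equivalence on the character list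
theorem pvKey (cs : List Char) :
    (∃ k, ∃ _ : k < cs.length, cs[k] = '@' ∧ cs.drop (k + 1) ∈ pvVerifiedEmails.map String.toList)
      ↔ ∃ d ∈ pvVerifiedEmails.map String.toList, ('@' :: d) <:+ cs := by
  constructor
  · rintro ⟨k, hk, hat, hmem⟩
    refine ⟨cs.drop (k + 1), hmem, ?_⟩
    have : cs.drop k = cs[k] :: cs.drop (k + 1) := List.drop_eq_getElem_cons hk
    rw [hat] at this
    exact this ▸ List.drop_suffix k cs
  · rintro ⟨d, hd, t, ht⟩
    have hk : t.length < cs.length := by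
      rw [← ht]; simp
    subst ht
    refine ⟨t.length, hk, ?_, ?_⟩
    · simp
    · rw [show t.length + 1 = (t ++ ['@']).length by simp, List.append_cons t '@' d,
        List.drop_left]
      exact hd

theorem emailIsFake_eq (email : String) : emailIsFake email = emailIsFake_alt email := by
  unfold emailIsFake emailIsFake_alt
  split_ifs with h
  · rfl
  · rcases hb : (pvVerifiedEmails.any fun d => PySem.Str.endswith email ("@" ++ d)) with _ | _
    · -- B's any is false: show the loop does not return false
      simp only [Bool.not_false]
      rcases ha : pvLoopA email (PySem.List.enumerate email.toList 0) with _ | _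
      · exfalso
        obtain ⟨p, hp, hat, hmem⟩ := (pvLoopA_eq_false_iff email _).mp ha
        obtain ⟨k, hk, rfl⟩ := (PySem.List.mem_enumerate_iff _ _ _).mp hp
        simp only [zero_add] at hat hmem
        have hmem' : email.toList.drop (k + 1) ∈ pvVerifiedEmails.map String.toList := by
          rw [← pvSlice_drop email k]
          exact (pvMem_toList _ _).mp hmem
        obtain ⟨d, hd, hsuf⟩ := (pvKey email.toList).mp ⟨k, hk, hat, hmem'⟩
        obtain ⟨s, hs, rfl⟩ := List.mem_map.mp hd
        have : PySem.Str.endswith email ("@" ++ s) = true := by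
          rw [PySem.Str.endswith_eq, PySem.Chars.endswith_iff]
          simpa using hsuf
        simp only [List.any_eq_false] at hb
        exact hb s hs this
      · rfl
    · -- B's any is true: show the loop returns false
      simp only [Bool.not_true]
      obtain ⟨s, hs, hend⟩ := List.any_eq_true.mp hb
      rw [PySem.Str.endswith_eq, PySem.Chars.endswith_iff] at hend
      have hsuf : ('@' :: s.toList) <:+ email.toList := by simpa using hend
      obtain ⟨k, hk, hat, hmem'⟩ := (pvKey email.toList).mpr
        ⟨s.toList, List.mem_map.mpr ⟨s, hs, rfl⟩, hsuf⟩
      apply (pvLoopA_eq_false_iff email _).mpr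
      refine ⟨((k : Int), email.toList[k]), ?_, hat, ?_⟩
      · exact (PySem.List.mem_enumerate_iff _ _ _).mpr ⟨k, hk, by simp⟩
      · apply (pvMem_toList _ _).mpr
        rw [pvSlice_drop email k]
        exact hmem'

-- ===== VERDICT (by name: the statement is the Claim_ definition above) =====
theorem emailIsFake_spec : Claim_equal_emailIsFake := by
  intro email _
  unfold Spec_emailIsFake
  exact emailIsFake_eq email
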